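-- pv_equiv track=rewrite | github.com/pg1992/advent-of-code-python | 2015/python/01/solution.py | count_floors
-- ===== SOURCE A (Python) =====
-- def count_floors(data):
--     """Count the total number of floors"""
--     total = 0
--     pos = -1
--     for i, direction in enumerate(data):
--         total += 1 if direction == '(' else -1
--         if total == -1 and pos == -1:
--             pos = i + 1
--     return total, pos
-- ===== SOURCE B (Python) =====
-- def count_floors(data):
--     """Count the total number of floors"""
--     sums = []
--     s = 0
--     for c in data:
--         s += 1 if c == '(' else -1
--         sums.append(s)
--     total = sums[-1] if sums else 0
--     pos = sums.index(-1) + 1 if -1 in sums else -1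
--     return total, pos
-- ===== Notes on version B (the rewrite author's own statement) =====
-- stated objective: alternative
-- what changed: B materialises the list of prefix sums in a first stage and then reads the answer off it (total = last prefix sum or 0, pos = first index of -1 plus 1), instead of A's single loop threading both a running total and a sentinel pos variable.
import Mathlib
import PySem

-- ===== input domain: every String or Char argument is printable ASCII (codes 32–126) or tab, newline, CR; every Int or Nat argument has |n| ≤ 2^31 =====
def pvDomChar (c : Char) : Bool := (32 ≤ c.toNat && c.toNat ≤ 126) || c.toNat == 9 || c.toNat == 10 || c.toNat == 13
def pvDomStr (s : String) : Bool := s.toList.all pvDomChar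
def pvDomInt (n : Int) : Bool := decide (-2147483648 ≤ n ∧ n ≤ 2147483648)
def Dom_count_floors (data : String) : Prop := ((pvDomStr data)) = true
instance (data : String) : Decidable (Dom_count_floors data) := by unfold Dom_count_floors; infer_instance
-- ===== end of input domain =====

-- B builds the list of prefix sums first and then reads off total (last element
-- or 0) and pos (first index of -1, plus 1), instead of A's single loop carrying
-- a running total and a sentinel pos (objective: alternative decomposition).


-- ===== PORT A =====
-- the for-loop of A over enumerate(data), state (i, total, pos)
def countFloorsLoop : List Char → Int → Int → Int → Int × Int
  | [], _, total, pos => (total, pos)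
  | c :: cs, i, total, pos =>
    let total' := total + (if c = '(' then 1 else -1)
    let pos' := if total' = -1 ∧ pos = -1 then i + 1 else pos
    countFloorsLoop cs (i + 1) total' pos'

def count_floors (data : String) : Int × Int :=
  countFloorsLoop data.toList 0 0 (-1)

-- ===== PORT B =====
-- stage 1 of B: build the list of prefix sums (accumulator s)
def prefixSums : List Char → Int → List Int
  | [], _ => []
  | c :: cs, s =>
    let s' := s + (if c = '(' then 1 else -1)
    s' :: prefixSums cs s'

def count_floors_alt (data : String) : Int × Int :=
  let sums := prefixSums data.toList 0
  let total := sums.getLastD 0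
  let pos : Int := if sums.contains (-1) then (sums.idxOf (-1) : Int) + 1 else -1
  (total, pos)

-- ===== PRECONDITION & SPEC =====
def Spec_count_floors (data : String) (out : Int × Int) : Prop := out = count_floors_alt data
instance (data : String) (out : Int × Int) : Decidable (Spec_count_floors data out) := by unfold Spec_count_floors; infer_instance

-- ===== CLAIM (what is proved, stated in full; the proofs are below) =====
def Claim_equal_count_floors : Prop := ∀ (data : String), Dom_count_floors data → Spec_count_floors data (count_floors data)

-- ===== LEMMAS AND PROOFS =====

-- the last prefix sum (default s) is s plus the sum of all deltas
theorem prefixSums_getLastD (l : List Char) : ∀ s : Int,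
    (prefixSums l s).getLastD s = s + (l.map (fun c => if c = '(' then (1 : Int) else -1)).sum := by
  induction l with
  | nil => intro s; simp [prefixSums]
  | cons c cs ih =>
    intro s
    simp only [prefixSums, List.getLastD_cons, List.map_cons, List.sum_cons, ih]
    ring

-- once pos is set (≠ -1) it never changes, and the total keeps accumulating
theorem countFloorsLoop_set (l : List Char) : ∀ (i t p : Int), p ≠ -1 →
    countFloorsLoop l i t p = (t + (l.map (fun c => if c = '(' then (1 : Int) else -1)).sum, p) := by
  induction l with
  | nil => intro i t p hp; simp [countFloorsLoop]
  | cons c cs ih =>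
    intro i t p hp
    simp only [countFloorsLoop]
    rw [if_neg (show ¬((t + (if c = '(' then 1 else -1)) = -1 ∧ p = -1) from fun hx => hp hx.2),
      ih _ _ _ hp]
    simp only [List.map_cons, List.sum_cons]
    ring_nf

-- while pos is still -1, A's loop equals B's read-off from the prefix-sum list
theorem countFloorsLoop_unset (l : List Char) : ∀ (i t : Int), 0 ≤ i →
    countFloorsLoop l i t (-1) =
      ((prefixSums l t).getLastD t,
       if (prefixSums l t).contains (-1)
       then ((prefixSums l t).idxOf (-1) : Int) + i + 1 else -1) := by
  induction l with
  | nil => intro i t _; simp [countFloorsLoop, prefixSums]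
  | cons c cs ih =>
    intro i t hi
    simp only [countFloorsLoop, prefixSums, and_true]
    by_cases h : t + (if c = '(' then 1 else -1) = -1
    · rw [if_pos h, countFloorsLoop_set _ _ _ _ (show i + 1 ≠ -1 by omega),
        List.getLastD_cons, prefixSums_getLastD]
      have hc : ((t + (if c = '(' then 1 else -1)) :: prefixSums cs (t + (if c = '(' then 1 else -1))).contains (-1) = true := by
        simp [h]
      have hidx : ((t + (if c = '(' then 1 else -1)) :: prefixSums cs (t + (if c = '(' then 1 else -1))).idxOf (-1) = 0 := by
        simp [h]
      rw [if_pos hc, hidx]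
      refine Prod.ext (by ring) (by simp)
    · rw [if_neg h, ih _ _ (by omega), List.getLastD_cons]
      have hne : ((-1 : Int) == (t + (if c = '(' then 1 else -1))) = false := by
        simp; exact fun hx => h hx.symm
      have hcc : ((t + (if c = '(' then 1 else -1)) :: prefixSums cs (t + (if c = '(' then 1 else -1))).contains (-1)
          = (prefixSums cs (t + (if c = '(' then 1 else -1))).contains (-1) := by
        simp only [List.contains_cons, hne, Bool.false_or]
      have hii : ((t + (if c = '(' then 1 else -1)) :: prefixSums cs (t + (if c = '(' then 1 else -1))).idxOf (-1)
          = (prefixSums cs (t + (if c = '(' then 1 else -1))).idxOf (-1) + 1 := by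
        simp [h]
      refine Prod.ext rfl ?_
      simp only [hcc, hii]
      by_cases hm : (prefixSums cs (t + (if c = '(' then 1 else -1))).contains (-1)
      · rw [if_pos hm, if_pos hm]; push_cast; ring
      · rw [if_neg hm, if_neg hm]

-- ===== VERDICT (by name: the statement is the Claim_ definition above) =====
theorem count_floors_spec : Claim_equal_count_floors := by
  intro data _
  unfold Spec_count_floors count_floors count_floors_alt
  rw [countFloorsLoop_unset _ _ _ (le_refl 0)]
  simp
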